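-- pv_equiv track=rewrite | github.com/nl77-seraph/MMF | util/process_ARES_data.py | rm_zero
-- ===== SOURCE A (Python) =====
-- def rm_zero(sequence):
--     """
--     移除序列末尾的零填充，确保不会返回空数组
--
--     参数:
--         sequence: 输入序列
--
--     返回:
--         处理后的序列，至少保留一个元素
--     """
--     if len(sequence) == 0:
--         return sequence  # 如果序列为空，则直接返回
--
--     # 找到最后一个非零元素的位置
--     index = 1  # 默认至少保留一个元素
--     for i in range(len(sequence) - 1, -1, -1):
--         if sequence[i] != 0:
--             index = i + 1
--             break
--
--     # 确保至少保留100个元素（或整个序列如果更短）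
--     index = max(index, min(100, len(sequence)))
--
--     return sequence[:index]
-- ===== SOURCE B (Python) =====
-- def rm_zero(sequence):
--     """Single forward pass: collect non-zero positions, cut after the last one
--     (default 1), never below min(100, len(sequence))."""
--     nz = [i for i, v in enumerate(sequence) if v != 0]
--     index = nz[-1] + 1 if nz else 1
--     index = max(index, min(100, len(sequence)))
--     return sequence[:index]
-- ===== Notes on version B (the rewrite author's own statement) =====
-- stated objective: idiomatic
-- what changed: Replaces the backward early-break index loop with a single forward enumerate pass that materialises the list of non-zero positions and reads its last entry.
import Mathlib
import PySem

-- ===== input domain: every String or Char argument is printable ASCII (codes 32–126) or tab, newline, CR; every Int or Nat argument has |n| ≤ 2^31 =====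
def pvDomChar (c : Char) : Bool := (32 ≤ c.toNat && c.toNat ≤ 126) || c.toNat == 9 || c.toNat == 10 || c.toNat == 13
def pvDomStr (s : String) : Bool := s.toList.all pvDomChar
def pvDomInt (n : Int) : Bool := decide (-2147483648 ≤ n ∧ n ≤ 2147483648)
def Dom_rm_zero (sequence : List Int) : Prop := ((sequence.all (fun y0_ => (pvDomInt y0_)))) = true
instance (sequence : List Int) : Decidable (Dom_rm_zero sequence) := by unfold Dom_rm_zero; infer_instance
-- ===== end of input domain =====

-- B replaces A's backward early-break scan with a single forward enumerate pass
-- collecting the non-zero positions and reading the last one (objective: idiomatic).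

-- ===== PORT A =====
-- the backward 'for i in range(len-1, -1, -1): if sequence[i] != 0: index = i+1; break' loop
def rm_zero_loop (sequence : List Int) : List Int → Int
  | [] => 1
  | i :: rest =>
      if PySem.List.pyGetD sequence i 0 ≠ 0 then i + 1
      else rm_zero_loop sequence rest

def rm_zero (sequence : List Int) : List Int :=
  if (sequence.length : Int) = 0 then sequence
  else
    let index := rm_zero_loop sequence
        (PySem.List.pyRange ((sequence.length : Int) - 1) (-1) (-1))
    let index := max index (min 100 (sequence.length : Int))
    PySem.List.slice sequence none (some index)

-- ===== PORT B =====
def rm_zero_alt (sequence : List Int) : List Int :=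
  let nz := (PySem.List.enumerate sequence).filterMap
      (fun p => if p.2 ≠ 0 then some p.1 else none)
  let index := match nz.getLast? with
    | some i => i + 1
    | none => 1
  let index := max index (min 100 (sequence.length : Int))
  PySem.List.slice sequence none (some index)

-- ===== PRECONDITION & SPEC =====
def Spec_rm_zero (sequence : List Int) (out : List Int) : Prop := out = rm_zero_alt sequence
instance (sequence : List Int) (out : List Int) : Decidable (Spec_rm_zero sequence out) := by unfold Spec_rm_zero; infer_instance

-- ===== CLAIM (what is proved, stated in full; the proofs are below) =====
def Claim_equal_rm_zero : Prop := ∀ (sequence : List Int), Dom_rm_zero sequence → Spec_rm_zero sequence (rm_zero sequence)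

-- ===== LEMMAS AND PROOFS =====

-- A's loop returns 1 + the first index of its index list whose element is non-zero (1 if none)
theorem rm_zero_loop_char (xs : List Int) (l : List Int) :
    rm_zero_loop xs l =
      (match (l.filter (fun i => decide (PySem.List.pyGetD xs i 0 ≠ 0))).head? with
        | some i => i + 1
        | none => 1) := by
  induction l with
  | nil => rfl
  | cons i rest ih =>
      by_cases h : PySem.List.pyGetD xs i 0 ≠ 0 <;>
        simp [rm_zero_loop, h, ih]

-- closed form of range(n-1, -1, -1)
theorem pyRange_down_eq (n : Nat) :
    PySem.List.pyRange ((n : Int) - 1) (-1) (-1)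
      = (List.range n).map (fun k : Nat => ((n : Int) - 1 - (k : Int))) := by
  simp only [PySem.List.pyRange]
  norm_num
  split_ifs with h
  · apply List.map_congr_left
    intro k _
    ring
  · have hn : n = 0 := by omega
    subst hn
    rfl

-- range(n-1, -1, -1) is the reverse of the (cast) indices 0..n-1
theorem pyRange_down (n : Nat) :
    PySem.List.pyRange ((n : Int) - 1) (-1) (-1)
      = ((List.range n).map (fun k : Nat => (k : Int))).reverse := by
  rw [pyRange_down_eq]
  apply List.ext_getElem
  · simp
  · intro j h1 h2
    simp only [List.length_map, List.length_range] at h1 h2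
    rw [List.getElem_map, List.getElem_reverse, List.getElem_map]
    simp only [List.length_map, List.length_range, List.getElem_range]
    omega

-- B's comprehension collects exactly the non-zero indices of range(len), shifted by the start
theorem enumerate_nz (xs : List Int) (s : Int) :
    (PySem.List.enumerate xs s).filterMap (fun p => if p.2 ≠ 0 then some p.1 else none)
      = ((List.range xs.length).filter (fun k => decide (xs.getD k 0 ≠ 0))).map
          (fun k : Nat => s + (k : Int)) := by
  induction xs generalizing s with
  | nil => rfl
  | cons x t ih =>
      rw [show PySem.List.enumerate (x :: t) s = (s, x) :: PySem.List.enumerate t (s + 1) from rfl,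
        List.filterMap_cons, ih]
      by_cases h : x = 0 <;>
        simp [h, List.range_succ_eq_map, List.filter_map, Function.comp_def, List.map_map] <;>
        · apply List.map_congr_left
          intro k _
          ring

-- the two index computations coincide
theorem index_eq (xs : List Int) :
    rm_zero_loop xs (PySem.List.pyRange ((xs.length : Int) - 1) (-1) (-1))
      = (match ((PySem.List.enumerate xs).filterMap
            (fun p => if p.2 ≠ 0 then some p.1 else none)).getLast? with
          | some i => i + 1
          | none => 1) := by
  rw [rm_zero_loop_char, pyRange_down, List.filter_reverse, List.head?_reverse,
    enumerate_nz xs 0, List.filter_map]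
  have hp : ((fun i => decide (PySem.List.pyGetD xs i 0 ≠ 0)) ∘ (fun k : Nat => (k : Int)))
      = (fun k => decide (xs.getD k 0 ≠ 0)) := by
    funext k
    simp [PySem.List.pyGetD_natCast]
  rw [hp]
  have hf : (fun k : Nat => (0 : Int) + (k : Int)) = (fun k : Nat => (k : Int)) := by
    funext k
    ring
  rw [hf]

-- ===== VERDICT (by name: the statement is the Claim_ definition above) =====
theorem rm_zero_spec : Claim_equal_rm_zero := by
  intro sequence _
  unfold Spec_rm_zero
  cases sequence with
  | nil => decide
  | cons x t =>
      rw [rm_zero, if_neg (by push_cast [List.length_cons]; omega)]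
      simp only [rm_zero_alt, index_eq]
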